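-- pv_equiv track=rewrite | github.com/mscroggs/KLBFAX | pages/games.py | width
-- ===== SOURCE A (Python) =====
-- def width(n):
--     out = 1
--     for digit in str(n):
--         if digit == "1":
--             out += 3
--         else:
--             out += 5
--     return out
-- ===== SOURCE B (Python) =====
-- def width(n):
--     s = str(n)
--     return 1 + 5 * len(s) - 2 * s.count("1")
-- ===== Notes on version B (the rewrite author's own statement) =====
-- stated objective: simpler
-- what changed: Replaces the per-character accumulation loop with a single closed-form arithmetic expression over the length of str(n) and the number of ones digits in it.
import Mathlib
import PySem

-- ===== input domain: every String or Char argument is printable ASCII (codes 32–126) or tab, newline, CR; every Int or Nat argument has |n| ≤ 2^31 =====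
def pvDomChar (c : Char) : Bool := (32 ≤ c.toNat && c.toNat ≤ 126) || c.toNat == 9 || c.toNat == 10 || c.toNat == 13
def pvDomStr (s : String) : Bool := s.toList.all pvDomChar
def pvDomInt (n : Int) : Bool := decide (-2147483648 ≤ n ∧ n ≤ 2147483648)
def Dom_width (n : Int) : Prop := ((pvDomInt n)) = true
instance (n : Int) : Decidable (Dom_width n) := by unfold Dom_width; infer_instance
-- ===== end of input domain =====

-- B replaces A's per-character loop with the closed form 1 + 5*len - 2*count('1') (simpler).
-- ===== PORT A =====
def width (n : Int) : Int :=
  (PySem.Int.toChars n).foldl (fun out digit => if digit == '1' then out + 3 else out + 5) 1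

-- ===== PORT B =====
def width_alt (n : Int) : Int :=
  1 + 5 * PySem.Str.len (PySem.Int.toStr n) - 2 * (PySem.Str.count (PySem.Int.toStr n) "1" : Int)

-- ===== PRECONDITION & SPEC =====
def Spec_width (n : Int) (out : Int) : Prop := out = width_alt n
instance (n : Int) (out : Int) : Decidable (Spec_width n out) := by unfold Spec_width; infer_instance

-- ===== CLAIM (what is proved, stated in full; the proofs are below) =====
def Claim_equal_width : Prop := ∀ (n : Int), Dom_width n → Spec_width n (width n)

-- ===== LEMMAS AND PROOFS =====

theorem width_foldl_closed (l : List Char) (a : Int) :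
    l.foldl (fun out digit => if digit == '1' then out + 3 else out + 5) a
      = a + 5 * l.length - 2 * l.count '1' := by
  induction l generalizing a with
  | nil => simp
  | cons c cs ih =>
    simp only [List.foldl_cons, List.count_cons, ih]
    by_cases h : c = '1' <;> simp [h] <;> ring

theorem count_go_singleton (c : Char) (fuel : Nat) (l : List Char) (acc : Nat)
    (h : l.length ≤ fuel) :
    PySem.Chars.count.go [c] fuel l acc = acc + l.count c := by
  induction fuel generalizing l acc with
  | zero =>
    have : l = [] := List.eq_nil_of_length_eq_zero (Nat.le_zero.mp h)
    subst this; rfl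
  | succ f ih =>
    cases l with
    | nil => rfl
    | cons x xs =>
      simp only [PySem.Chars.count.go, List.count_cons]
      by_cases hx : x = c
      · subst hx
        have hp : [x].isPrefixOf (x :: xs) = true := by simp [List.isPrefixOf]
        simp only [hp, if_true, List.length_cons, List.length_nil, List.drop_succ_cons, List.drop_zero]
        rw [ih xs (acc + 1) (by simpa using h)]
        simp; omega
      · have hp : [c].isPrefixOf (x :: xs) = false := by
          simp [List.isPrefixOf]; exact fun h' => absurd h'.symm hx
        simp only [hp, Bool.false_eq_true, if_false]
        rw [ih xs acc (by simpa using h)]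
        simp [hx]

theorem count_singleton_sub (l : List Char) (c : Char) :
    PySem.Chars.count l [c] = l.count c := by
  simpa using count_go_singleton c l.length l 0 le_rfl

-- ===== VERDICT (by name: the statement is the Claim_ definition above) =====
theorem width_spec : Claim_equal_width := by
  intro n _
  unfold Spec_width width width_alt
  rw [width_foldl_closed]
  simp [PySem.Str.count, PySem.Int.toList_toStr, count_singleton_sub]
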